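-- pv_equiv track=rewrite | github.com/PJunyeong/Coding-Test | LV3/입국심사.py | solution
-- ===== SOURCE A (Python) =====
-- def solution(n, times):
--     result = 0
--     times.sort()
--     # 심사 시간이 가장 "짧은" 심사관이 주어진 시간에 "가장 많은" 사람을 심사 가능 -> check 가산 부분에서 속도 향상
--
--     left, right = 0, times[-1]*n
--     # n명을 검사하는 데 걸리는 최소 시간 -> mid를 통해 "최소 시간" 찾기
--
--     while left <= right:
--         # 주어진 최소 mid를 찾아 result로 넘길 때까지 이분 탐색
--         mid = (left + right) // 2
--         # mid는 각 심사관에게 주어진 시간. 이 시간 내에 모든 사람 체크할 수 있는지 확인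
--         check = 0
--         checkable = False
--
--         for time in times:
--             check += mid // time
--             if check >= n:
--                 checkable = True
--                 # mid분으로 n명 검사 가능
--                 break
--
--         if checkable:
--             result = mid
--             right = mid - 1
--         else:
--             left = mid + 1
--
--     return result
-- ===== SOURCE B (Python) =====
-- def solution(n, times):
--     # Note: like A, sorts `times` in place (same observable mutation).
--     times.sort()
--     if n <= 0:
--         return 0
--     # Closed-form jump: fixed-point service rate (62 fractional bits, each
--     # reciprocal rounded UP so the jump can never overshoot the answer), then
--     # merge the per-examiner finish-event streams until n people are done.
--     P = 1 << 62
--     S = sum(-(-P // t) for t in times)      # ceil(P/t) summed: rate in people per P time units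
--     T0 = n * P // S                         # lands at or before the answer
--     c = sum(T0 // t for t in times)         # people already done by T0 (c <= n)
--     nxt = [(T0 // t + 1) * t for t in times]  # each examiner's next finish event after T0
--     last = T0
--     for _ in range(n - c):                  # consume the remaining finish events in time order
--         v = min(nxt)
--         i = nxt.index(v)
--         nxt[i] = v + times[i]
--         last = v
--     return last
-- ===== Notes on version B (the rewrite author's own statement) =====
-- stated objective: alternative
-- what changed: replaces A's binary search on the answer (lo/hi bisection with an early-breaking per-examiner feasibility scan) by a search-free event construction: a closed-form fixed-point-rate jump (sum of upward-rounded reciprocals, 62 fractional bits) lands at a lower bound T0 of the answer, then the per-examiner arithmetic progressions of finish events are merged (repeatedly popping the minimum pending finish time) until n people are done, returning the last event; …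
-- outside the precondition, e.g. on solution(2, [-3]): A returns 0, B returns -7; on solution(3, [-2, 4]): A returns 0, B returns -12
import Mathlib
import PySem

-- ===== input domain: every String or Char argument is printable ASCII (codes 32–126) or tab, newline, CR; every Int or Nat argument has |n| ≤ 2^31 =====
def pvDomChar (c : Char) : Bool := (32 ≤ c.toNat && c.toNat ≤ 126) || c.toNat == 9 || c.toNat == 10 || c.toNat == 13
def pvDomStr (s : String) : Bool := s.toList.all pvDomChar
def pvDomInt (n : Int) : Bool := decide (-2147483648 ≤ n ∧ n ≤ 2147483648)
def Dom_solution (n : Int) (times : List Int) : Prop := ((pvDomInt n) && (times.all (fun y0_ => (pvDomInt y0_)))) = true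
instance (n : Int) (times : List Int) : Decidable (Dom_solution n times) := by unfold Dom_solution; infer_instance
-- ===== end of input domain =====

-- B replaces A's binary search on the answer by a closed-form fixed-point rate jump to a lower
-- bound of the answer followed by a merge of the per-examiner finish-event streams ("alternative").
-- Both versions sort `times` in place; the equivalence proved here is about the return value.

-- ===== PORT A =====
-- inner `for time in times: check += mid // time; if check >= n: break` (returns `checkable`)
def solCheck (n mid : Int) : List Int → Int → Bool
  | [], _check => false
  | t :: ts, check =>
    let check := check + PySem.Int.floordiv mid t
    if n ≤ check then true else solCheck n mid ts check

-- outer `while left <= right` binary search, carrying `result`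
def solLoop (n : Int) (times : List Int) (left right result : Int) : Int :=
  if _h : left ≤ right then
    let mid := PySem.Int.floordiv (left + right) 2
    if solCheck n mid times 0 then solLoop n times left (mid - 1) mid
    else solLoop n times (mid + 1) right result
  else result
termination_by (right + 1 - left).toNat
decreasing_by
  · have hb := PySem.Int.floordiv_two_mid_bounds _h; omega
  · have hb := PySem.Int.floordiv_two_mid_bounds _h; omega

def solution (n : Int) (times : List Int) : Int :=
  let times := PySem.List.sorted times (fun t => t) false  -- times.sort()
  let left : Int := 0
  -- times[-1]: IndexError on empty `times`, excluded by Pre_solution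
  let right : Int := (PySem.List.pyGetD times (-1) 0) * n
  solLoop n times left right 0

-- ===== PORT B =====
-- sum(T0 // t for t in times)
def altLoad (times : List Int) (x : Int) : Int :=
  (times.map (fun t => PySem.Int.floordiv x t)).sum

-- S = sum(-(-P // t) for t in times), P = 1 << 62
def altS (times : List Int) : Int :=
  (times.map (fun t => -(PySem.Int.floordiv (-4611686018427387904) t))).sum

-- nxt = [(T0 // t + 1) * t for t in times]
def altNxt (times : List Int) (T0 : Int) : List Int :=
  times.map (fun t => (PySem.Int.floordiv T0 t + 1) * t)

-- `for _ in range(n - c): v = min(nxt); i = nxt.index(v); nxt[i] = v + times[i]; last = v`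
def altPop (times : List Int) : Nat → List Int → Int → Int
  | 0, _nxt, last => last
  | r + 1, nxt, last =>
    match PySem.List.min? nxt (fun x => x) with
    | none => last          -- unreachable (nxt is nonempty); totality guard
    | some v =>
      match PySem.List.index? nxt v with
      | none => last        -- unreachable (v ∈ nxt); totality guard
      | some i => altPop times r (nxt.set i (v + PySem.List.pyGetD times (i : Int) 0)) v

def solution_alt (n : Int) (times : List Int) : Int :=
  let times := PySem.List.sorted times (fun t => t) false  -- times.sort()
  if n ≤ 0 then 0
  else
    let P : Int := 4611686018427387904   -- 1 << 62
    let S := altS times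
    let T0 := PySem.Int.floordiv (n * P) S
    let c := altLoad times T0
    altPop times (n - c).toNat (altNxt times T0) T0

-- ===== PRECONDITION & SPEC =====
-- Pre_ admits the task's natural domain (a nonempty list of positive inspection times, any n)
-- and additionally every n ≤ 0 input whose smallest time is nonzero (there A returns 0 at once).
-- Excluded: [] (IndexError), a reachable 0 time (ZeroDivisionError), and n > 0 with a
-- nonpositive time, where A's feasibility scan is non-monotone and its bisection result is an
-- accident of the search path.
def Pre_solution (n : Int) (times : List Int) : Prop :=
  times ≠ [] ∧
    ((∀ t ∈ times, 0 < t) ∨ (n ≤ 0 ∧ ((0:Int) ∉ times ∨ ∃ t ∈ times, t < 0)))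
instance (n : Int) (times : List Int) : Decidable (Pre_solution n times) := by
  unfold Pre_solution; infer_instance

def pvWitness_solution : Int × List Int := (6, [7, 10])

def Spec_solution (n : Int) (times : List Int) (out : Int) : Prop := out = solution_alt n times
instance (n : Int) (times : List Int) (out : Int) : Decidable (Spec_solution n times out) := by
  unfold Spec_solution; infer_instance

-- ===== CLAIM (what is proved, stated in full; the proofs are below) =====
def Claim_equal_solution : Prop := ∀ (n : Int) (times : List Int), Dom_solution n times → Pre_solution n times → Spec_solution n times (solution n times)

-- ===== LEMMAS AND PROOFS =====

theorem altLoad_nonneg (ts : List Int) (ht : ∀ t ∈ ts, 0 < t) (x : Int) (hx : 0 ≤ x) :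
    0 ≤ altLoad ts x := by
  induction ts with
  | nil => simp [altLoad]
  | cons t ts ih =>
      have h1 : 0 ≤ PySem.Int.floordiv x t := by
        rw [PySem.Int.floordiv_eq_ediv_of_pos (ht t (by simp))]
        exact Int.ediv_nonneg hx (le_of_lt (ht t (by simp)))
      have h2 := ih (fun t htm => ht t (by simp [htm]))
      simp only [altLoad, List.map_cons, List.sum_cons] at *
      omega

theorem altLoad_mono (ts : List Int) (ht : ∀ t ∈ ts, 0 < t) {x y : Int} (hxy : x ≤ y) :
    altLoad ts x ≤ altLoad ts y := by
  induction ts with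
  | nil => simp [altLoad]
  | cons t ts ih =>
      have h1 : PySem.Int.floordiv x t ≤ PySem.Int.floordiv y t := by
        rw [PySem.Int.floordiv_eq_ediv_of_pos (ht t (by simp)),
            PySem.Int.floordiv_eq_ediv_of_pos (ht t (by simp))]
        exact Int.ediv_le_ediv (ht t (by simp)) hxy
      have h2 := ih (fun t htm => ht t (by simp [htm]))
      simp only [altLoad, List.map_cons, List.sum_cons] at *
      omega

theorem altLoad_zero (ts : List Int) (ht : ∀ t ∈ ts, 0 < t) : altLoad ts 0 = 0 := by
  induction ts with
  | nil => simp [altLoad]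
  | cons t ts ih =>
      have h1 : PySem.Int.floordiv 0 t = 0 := by
        rw [PySem.Int.floordiv_eq_ediv_of_pos (ht t (by simp))]
        simp
      have h2 := ih (fun t htm => ht t (by simp [htm]))
      simp only [altLoad, List.map_cons, List.sum_cons] at *
      omega

theorem altLoad_hi (ts : List Int) (ht : ∀ t ∈ ts, 0 < t) {m n : Int}
    (hm : m ∈ ts) (hn : 1 ≤ n) : n ≤ altLoad ts (m * n) := by
  have h0m : 0 < m := ht m hm
  have hterm : PySem.Int.floordiv (m * n) m = n := by
    rw [PySem.Int.floordiv_eq_ediv_of_pos h0m]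
    exact Int.mul_ediv_cancel_left n (by omega)
  have hmem : PySem.Int.floordiv (m * n) m ∈ (ts.map (fun t => PySem.Int.floordiv (m * n) t)) :=
    List.mem_map_of_mem hm
  have hall : ∀ x ∈ ts.map (fun t => PySem.Int.floordiv (m * n) t), (0:Int) ≤ x := by
    intro x hx
    obtain ⟨t, htm, rfl⟩ := List.mem_map.1 hx
    rw [PySem.Int.floordiv_eq_ediv_of_pos (ht t htm)]
    exact Int.ediv_nonneg (by positivity) (le_of_lt (ht t htm))
  have := List.single_le_sum hall _ hmem
  simpa [altLoad, hterm] using this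

-- the early-breaking scan decides exactly "total workload ≥ n" (nonempty list, positive times)
theorem solCheck_cons (n mid t c : Int) (ts : List Int) :
    solCheck n mid (t :: ts) c =
      if n ≤ c + PySem.Int.floordiv mid t then true
      else solCheck n mid ts (c + PySem.Int.floordiv mid t) := rfl

theorem solCheck_iff (n mid : Int) (hmid : 0 ≤ mid) :
    ∀ (ts : List Int) (c : Int), ts ≠ [] → (∀ t ∈ ts, 0 < t) →
      (solCheck n mid ts c = true ↔ n ≤ c + altLoad ts mid) := by
  intro ts
  induction ts with
  | nil => intro c h; exact absurd rfl h
  | cons t ts ih =>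
      intro c _ ht
      have hd : 0 ≤ PySem.Int.floordiv mid t := by
        rw [PySem.Int.floordiv_eq_ediv_of_pos (ht t (by simp))]
        exact Int.ediv_nonneg hmid (le_of_lt (ht t (by simp)))
      rw [solCheck_cons]
      cases ts with
      | nil =>
          split_ifs with h
          · simp only [true_iff, altLoad, List.map_cons, List.map_nil, List.sum_cons,
              List.sum_nil]
            omega
          · simp only [solCheck, Bool.false_eq_true, false_iff, altLoad, List.map_cons,
              List.map_nil, List.sum_cons, List.sum_nil]
            omega
      | cons u us =>
          have hload : 0 ≤ altLoad (u :: us) mid :=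
            altLoad_nonneg _ (fun x hx => ht x (by simp [List.mem_cons] at hx ⊢; tauto)) _ hmid
          split_ifs with h
          · simp only [true_iff]
            simp only [altLoad, List.map_cons, List.sum_cons] at *
            omega
          · rw [ih (c + PySem.Int.floordiv mid t) (by simp)
              (fun x hx => ht x (by simp [List.mem_cons] at hx ⊢; tauto))]
            simp only [altLoad, List.map_cons, List.sum_cons] at *
            omega

-- A's binary search returns the least feasible time Tstar
theorem solLoop_eq (n : Int) (ts : List Int) (hne : ts ≠ []) (ht : ∀ t ∈ ts, 0 < t)
    (Tstar : Int) (_hT0 : 0 ≤ Tstar)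
    (hch : ∀ T, 0 ≤ T → (n ≤ altLoad ts T ↔ Tstar ≤ T)) :
    ∀ left right result, 0 ≤ left → left ≤ Tstar → (Tstar ≤ right ∨ result = Tstar) →
      solLoop n ts left right result = Tstar := by
  intro left right result
  induction left, right, result using solLoop.induct n ts with
  | case1 left right result h mid hcheck ih =>
      intro h0 hle hdisj
      have hb := PySem.Int.floordiv_two_mid_bounds h
      have hmid0 : 0 ≤ mid := le_trans h0 hb.1
      have hP : n ≤ altLoad ts mid := by
        have := (solCheck_iff n mid hmid0 ts 0 hne ht).1 hcheck
        omega
      have hTle : Tstar ≤ mid := (hch mid hmid0).1 hP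
      rw [solLoop, dif_pos h, if_pos hcheck]
      exact ih h0 hle (by omega)
  | case2 left right result h mid hcheck ih =>
      intro h0 hle hdisj
      have hb := PySem.Int.floordiv_two_mid_bounds h
      have hmid0 : 0 ≤ mid := le_trans h0 hb.1
      have hnP : ¬ n ≤ altLoad ts mid := by
        intro hP
        have := (solCheck_iff n mid hmid0 ts 0 hne ht).2 (by omega)
        simp [this] at hcheck
      have hTgt : mid < Tstar := by
        by_contra hcon
        exact hnP ((hch mid hmid0).2 (by omega))
      rw [solLoop, dif_pos h, if_neg hcheck]
      exact ih (by omega) (by omega) hdisj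
  | case3 left right result h =>
      intro h0 hle hdisj
      rw [solLoop, dif_neg h]
      rcases hdisj with hr | hr
      · omega
      · exact hr

-- pointwise: for positive t and 0 ≤ T, floor(T/t)·P ≤ T·ceil(P/t) (P = 2^62)
theorem jump_pointwise (t T : Int) (ht : 0 < t) (hT : 0 ≤ T) :
    PySem.Int.floordiv T t * 4611686018427387904 ≤
      T * (-(PySem.Int.floordiv (-4611686018427387904) t)) := by
  rw [PySem.Int.floordiv_eq_ediv_of_pos ht, PySem.Int.floordiv_eq_ediv_of_pos ht]
  set q := T / t with hq
  set e := -((-4611686018427387904 : Int) / t) with he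
  have hq0 : 0 ≤ q := Int.ediv_nonneg hT (by omega)
  have hqt : q * t ≤ T := Int.ediv_mul_le T (by omega)
  have het : (4611686018427387904 : Int) ≤ e * t := by
    have h1 : ((-4611686018427387904 : Int) / t) * t ≤ -4611686018427387904 :=
      Int.ediv_mul_le _ (by omega)
    nlinarith
  have he0 : 0 < e := by nlinarith
  calc q * 4611686018427387904 ≤ q * (e * t) := mul_le_mul_of_nonneg_left het hq0
    _ = (q * t) * e := by ring
    _ ≤ T * e := mul_le_mul_of_nonneg_right hqt (by omega)

-- each examiner contributes at least 1 to S, so S > 0 on a nonempty positive list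
theorem altS_pos (ts : List Int) (hne : ts ≠ []) (ht : ∀ t ∈ ts, 0 < t) : 0 < altS ts := by
  induction ts with
  | nil => exact absurd rfl hne
  | cons t ts ih =>
      have htt := ht t (by simp)
      have hterm : 0 < -(PySem.Int.floordiv (-4611686018427387904) t) := by
        rw [PySem.Int.floordiv_eq_ediv_of_pos htt]
        have h1 : ((-4611686018427387904 : Int) / t) * t ≤ -4611686018427387904 :=
          Int.ediv_mul_le _ (by omega)
        nlinarith
      cases ts with
      | nil => simpa [altS] using hterm
      | cons u us =>
          have hrec := ih (by simp) (fun x hx => ht x (by simp [List.mem_cons] at hx ⊢; tauto))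
          simp only [altS, List.map_cons, List.sum_cons] at *
          omega

-- the rate jump never overshoots: any feasible T is at least T0 = (n·P) // S
theorem jump_le (n : Int) (ts : List Int) (ht : ∀ t ∈ ts, 0 < t) (hne : ts ≠ [])
    (T : Int) (hT : 0 ≤ T) (hfeas : n ≤ altLoad ts T) :
    PySem.Int.floordiv (n * 4611686018427387904) (altS ts) ≤ T := by
  have hS : 0 < altS ts := altS_pos ts hne ht
  have hcross : altLoad ts T * 4611686018427387904 ≤ T * altS ts := by
    clear hfeas hne hS
    induction ts with
    | nil => simp [altLoad, altS]
    | cons t ts ih =>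
        have h1 := jump_pointwise t T (ht t (by simp)) hT
        have h2 := ih (fun x hx => ht x (by simp [List.mem_cons] at hx ⊢; tauto))
        simp only [altLoad, altS, List.map_cons, List.sum_cons] at *
        nlinarith
  have hnP : n * 4611686018427387904 ≤ T * altS ts := by nlinarith
  rw [PySem.Int.floordiv_eq_ediv_of_pos hS]
  calc (n * 4611686018427387904) / altS ts ≤ (T * altS ts) / altS ts :=
        Int.ediv_le_ediv hS hnP
    _ = T := Int.mul_ediv_cancel T (by omega)

-- altLoad written as a sum over indices
theorem altLoad_eq_sum_idx (ts : List Int) (x : Int) :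
    altLoad ts x = ((List.range ts.length).map
      (fun i => PySem.Int.floordiv x (ts.getD i 0))).sum := by
  induction ts with
  | nil => simp [altLoad]
  | cons t ts ih =>
      simp only [altLoad] at ih ⊢
      rw [List.map_cons, List.sum_cons, ih, List.length_cons, List.range_succ_eq_map,
        List.map_cons, List.map_map]
      simp only [List.sum_cons]
      congr 1

-- two equal-length integer lists compare summed when they compare pointwise
theorem sum_le_sum_idx : ∀ (xs ys : List Int), xs.length = ys.length →
    (∀ i (h1 : i < xs.length) (h2 : i < ys.length), xs[i] ≤ ys[i]) → xs.sum ≤ ys.sum := by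
  intro xs
  induction xs with
  | nil =>
      intro ys hl _
      cases ys with
      | nil => simp
      | cons y ys => simp at hl
  | cons x xs ih =>
      intro ys hl hpt
      cases ys with
      | nil => simp at hl
      | cons y ys =>
          have h0 := hpt 0 (by simp) (by simp)
          have hrec := ih ys (by simpa using hl)
            (fun i h1 h2 => by simpa using hpt (i + 1) (by simpa using h1) (by simpa using h2))
          simp only [List.sum_cons] at *
          simp only [List.getElem_cons_zero] at h0
          omega

-- sum after a point update
theorem sum_set_int (as : List Int) (j : Nat) (x : Int) (h : j < as.length) :
    (as.set j x).sum = as.sum - as[j] + x := by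
  rw [List.sum_set, if_pos h]
  have h1 := List.sum_take_add_sum_drop as j
  rw [List.drop_eq_getElem_cons h] at h1
  simp only [List.sum_cons] at h1
  omega

-- the merge-loop invariant: `as` counts, per examiner, the finish events consumed so far;
-- everything consumed is ≤ L, everything pending (nxt) is ≥ L, and nxt[i] = (as[i]+1)·ts[i]
def PopInv (ts nxt as : List Int) (L c : Int) : Prop :=
  nxt.length = ts.length ∧ as.length = ts.length ∧ 0 ≤ L ∧ as.sum = c ∧
  ∀ i, i < ts.length →
    0 ≤ as.getD i 0 ∧
    nxt.getD i 0 = (as.getD i 0 + 1) * ts.getD i 0 ∧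
    as.getD i 0 * ts.getD i 0 ≤ L ∧ L ≤ nxt.getD i 0

-- under the invariant, the workload done by L is at least the consumed count
theorem popInv_load_ge (ts nxt as : List Int) (L c : Int) (ht : ∀ t ∈ ts, 0 < t)
    (hinv : PopInv ts nxt as L c) : c ≤ altLoad ts L := by
  obtain ⟨hln, hla, hL0, hsum, hpt⟩ := hinv
  rw [altLoad_eq_sum_idx]
  have hle := sum_le_sum_idx as ((List.range ts.length).map
      (fun i => PySem.Int.floordiv L (ts.getD i 0))) (by simp [hla]) ?_
  · omega
  · intro i h1 h2
    rw [hla] at h1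
    have hgetD : ts.getD i 0 = ts[i]'h1 := List.getD_eq_getElem ts 0 h1
    have hti : 0 < ts.getD i 0 := by
      rw [hgetD]; exact ht _ (List.getElem_mem h1)
    obtain ⟨ha0, _, haL, _⟩ := hpt i h1
    have hgA : as.getD i 0 = as[i]'(by omega) := List.getD_eq_getElem as 0 (by omega)
    simp only [List.getElem_map, List.getElem_range]
    rw [PySem.Int.floordiv_eq_ediv_of_pos hti, ← hgA]
    exact (Int.le_ediv_iff_mul_le hti).2 haL

-- under the invariant with one examiner whose last consumed event is exactly L,
-- the workload done strictly before L is below the consumed count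
theorem popInv_load_lt (ts nxt as : List Int) (L c : Int) (ht : ∀ t ∈ ts, 0 < t)
    (hinv : PopInv ts nxt as L c) (j : Nat) (hj : j < ts.length)
    (hLj : as.getD j 0 * ts.getD j 0 = L) :
    altLoad ts (L - 1) ≤ c - 1 := by
  obtain ⟨hln, hla, hL0, hsum, hpt⟩ := hinv
  have hjas : j < as.length := by omega
  rw [altLoad_eq_sum_idx]
  have hsum' : (as.set j (as[j] - 1)).sum = c - 1 := by
    rw [sum_set_int as j _ hjas]; omega
  have hle := sum_le_sum_idx ((List.range ts.length).map
      (fun i => PySem.Int.floordiv (L - 1) (ts.getD i 0))) (as.set j (as[j] - 1))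
      (by simp [hla]) ?_
  · omega
  · intro i h1 h2
    simp only [List.length_map, List.length_range] at h1
    have hgetD : ts.getD i 0 = ts[i]'h1 := List.getD_eq_getElem ts 0 h1
    have hti : 0 < ts.getD i 0 := by
      rw [hgetD]; exact ht _ (List.getElem_mem h1)
    obtain ⟨ha0, hnxt, haL, hLn⟩ := hpt i h1
    have hias : i < as.length := by omega
    have hgA : as.getD i 0 = as[i]'hias := List.getD_eq_getElem as 0 hias
    have hgAj : as.getD j 0 = as[j]'hjas := List.getD_eq_getElem as 0 hjas
    simp only [List.getElem_map, List.getElem_range, List.getElem_set]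
    rw [PySem.Int.floordiv_eq_ediv_of_pos hti]
    by_cases hij : j = i
    · subst hij
      rw [if_pos rfl]
      have hlt : L - 1 < ((as[j]'hjas - 1) + 1) * ts.getD j 0 := by
        rw [← hgA] at *
        nlinarith
      have := (Int.ediv_lt_iff_lt_mul hti).2 hlt
      omega
    · rw [if_neg hij]
      have hlt : L - 1 < (as.getD i 0 + 1) * ts.getD i 0 := by omega
      have := (Int.ediv_lt_iff_lt_mul hti).2 hlt
      rw [hgA] at this
      omega

-- the event merge: starting from any invariant state r events short of n,
-- it returns the least feasible time Tstar
theorem altPop_eq (n Tstar : Int) (ts : List Int) (hne : ts ≠ []) (ht : ∀ t ∈ ts, 0 < t)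
    (hch : ∀ T, 0 ≤ T → (n ≤ altLoad ts T ↔ Tstar ≤ T)) :
    ∀ (r : Nat) (nxt as : List Int) (L c : Int), PopInv ts nxt as L c →
      1 ≤ r → c + (r : Int) = n → altPop ts r nxt L = Tstar := by
  intro r
  induction r with
  | zero => intro _ _ _ _ _ hr; omega
  | succ s ih =>
      intro nxt as L c hinv _ hcr
      obtain ⟨hln, hla, hL0, hsum, hpt⟩ := hinv
      have hlpos : 0 < ts.length := by
        cases hts : ts with
        | nil => exact absurd hts hne
        | cons a l => simp
      have hne' : nxt ≠ [] := by
        intro h; rw [h] at hln; simp at hln; omega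
      -- v = min(nxt), i = nxt.index(v)
      obtain ⟨v, hmin⟩ : ∃ v, PySem.List.min? nxt (fun x => x) = some v := by
        cases hm : PySem.List.min? nxt (fun x => x) with
        | none => exact absurd ((PySem.List.min?_eq_none_iff nxt _).1 hm) hne'
        | some v => exact ⟨v, rfl⟩
      have hvmem : v ∈ nxt := PySem.List.min?_mem hmin
      have hvmin : ∀ y ∈ nxt, v ≤ y := PySem.List.min?_isMin hmin
      obtain ⟨i, hidx⟩ : ∃ i, PySem.List.index? nxt v = some i := by
        cases hm : PySem.List.index? nxt v with
        | none => exact absurd ((PySem.List.index?_eq_none_iff nxt v).1 hm) (by simp [hvmem])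
        | some i => exact ⟨i, rfl⟩
      obtain ⟨hilt, hiv, _⟩ := PySem.List.getElem_of_index?_eq_some hidx
      have hits : i < ts.length := by omega
      have hias : i < as.length := by omega
      have hginxt : nxt.getD i 0 = v := by
        rw [List.getD_eq_getElem nxt 0 hilt, hiv]
      -- L ≤ v since v is a pending event
      have hLv : L ≤ v := by
        obtain ⟨k, hk, rfl⟩ := List.getElem_of_mem hvmem
        have := (hpt k (by omega)).2.2.2
        rwa [List.getD_eq_getElem nxt 0 hk] at this
      -- the one altPop step
      have hstep : altPop ts (s + 1) nxt L =
          altPop ts s (nxt.set i (v + PySem.List.pyGetD ts (i : Int) 0)) v := by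
        simp only [altPop, hmin, hidx]
      have hgetts : PySem.List.pyGetD ts (i : Int) 0 = ts.getD i 0 :=
        PySem.List.pyGetD_natCast ts i 0
      -- the updated state satisfies the invariant with count c + 1 and frontier v
      have hinv' : PopInv ts (nxt.set i (v + PySem.List.pyGetD ts (i : Int) 0))
          (as.set i (as[i] + 1)) v (c + 1) := by
        refine ⟨by simp [hln], by simp [hla], by omega, ?_, ?_⟩
        · rw [sum_set_int as i _ hias]; omega
        · intro k hk
          have hkn : k < nxt.length := by omega
          have hka : k < as.length := by omega
          have hgtk : 0 < ts.getD k 0 := by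
            rw [List.getD_eq_getElem ts 0 hk]
            exact ht _ (List.getElem_mem hk)
          obtain ⟨ha0, hnxtk, haL, hLn⟩ := hpt k hk
          have hsetn : (nxt.set i (v + PySem.List.pyGetD ts (i : Int) 0)).getD k 0 =
              if i = k then v + PySem.List.pyGetD ts (i : Int) 0 else nxt.getD k 0 := by
            rw [List.getD_eq_getElem _ 0 (by simp; omega), List.getElem_set]
            split_ifs with h
            · rfl
            · rw [List.getD_eq_getElem nxt 0 hkn]
          have hseta : (as.set i (as[i] + 1)).getD k 0 =
              if i = k then as[i]'hias + 1 else as.getD k 0 := by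
            rw [List.getD_eq_getElem _ 0 (by simp; omega), List.getElem_set]
            split_ifs with h
            · rfl
            · rw [List.getD_eq_getElem as 0 hka]
          rw [hsetn, hseta]
          by_cases hik : i = k
          · subst hik
            rw [if_pos rfl, if_pos rfl]
            obtain ⟨ha0i, hnxti, haLi, hLni⟩ := hpt i hits
            have hgAi : as.getD i 0 = as[i]'hias := List.getD_eq_getElem as 0 hias
            rw [hginxt] at hnxti
            rw [hgAi] at hnxti ha0i haLi
            have hgtI : 0 < ts.getD i 0 := hgtk
            refine ⟨by omega, ?_, ?_, ?_⟩
            · rw [hgetts, hnxti]; ring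
            · rw [← hnxti]
            · rw [hgetts]; omega
          · rw [if_neg hik, if_neg hik]
            have hvk : v ≤ nxt.getD k 0 := by
              rw [List.getD_eq_getElem nxt 0 hkn]
              exact hvmin _ (List.getElem_mem hkn)
            exact ⟨ha0, hnxtk, by omega, hvk⟩
      cases s with
      | zero =>
          -- last pop: the returned v is exactly Tstar
          rw [hstep]
          show v = Tstar
          have hv0 : 0 ≤ v := by omega
          have hge : (n : Int) ≤ altLoad ts v := by
            have := popInv_load_ge ts _ _ v (c + 1) ht hinv'
            push_cast at hcr
            omega
          have hTle : Tstar ≤ v := (hch v hv0).1 hge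
          -- v - 1 is infeasible: examiner i's last consumed event is exactly v
          obtain ⟨ha0i, hnxti, _, _⟩ := hpt i hits
          have hgAi : as.getD i 0 = as[i]'hias := List.getD_eq_getElem as 0 hias
          rw [hginxt] at hnxti
          have hvi : (as.set i (as[i] + 1)).getD i 0 * ts.getD i 0 = v := by
            rw [List.getD_eq_getElem _ 0 (by simp; omega), List.getElem_set, if_pos rfl]
            rw [hnxti, hgAi]
          have hlt := popInv_load_lt ts _ _ v (c + 1) ht hinv' i hits hvi
          have hgtI : 0 < ts.getD i 0 := by
            rw [List.getD_eq_getElem ts 0 hits]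
            exact ht _ (List.getElem_mem hits)
          have hv1 : 0 ≤ v - 1 := by nlinarith
          have hnot : ¬ (n ≤ altLoad ts (v - 1)) := by
            push_cast at hcr
            omega
          have hTgt : ¬ (Tstar ≤ v - 1) := fun hc => hnot ((hch (v - 1) hv1).2 hc)
          omega
      | succ s' =>
          rw [hstep]
          exact ih _ _ _ _ hinv' (by omega) (by push_cast at hcr ⊢; omega)

-- arithmetic for the n ≤ 0 branch: a nonpositive target is met by the first (smallest) examiner
theorem n_le_floordiv (mid h1 n : Int) (hh : h1 < 0) (hmid : mid ≤ n * h1) :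
    n ≤ PySem.Int.floordiv mid h1 := by
  have key := PySem.Int.floordiv_mul_add_mod mid h1
  have hr := PySem.Int.mod_neg_bounds (a := mid) hh
  by_contra hcon
  rw [not_le] at hcon
  have h2 : (n - 1) * h1 ≤ PySem.Int.floordiv mid h1 * h1 :=
    mul_le_mul_of_nonpos_right (by omega) (le_of_lt hh)
  have h3 : (n - 1) * h1 + h1 = n * h1 := by ring
  omega

-- when every probed mid is feasible, A's loop walks its right end down to `left`
theorem solLoop_all (n : Int) (ts : List Int) :
    ∀ left right result, left ≤ right →
      (∀ mid, left ≤ mid → mid ≤ right → solCheck n mid ts 0 = true) →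
      solLoop n ts left right result = left := by
  intro left right result
  induction left, right, result using solLoop.induct n ts with
  | case1 left right result h mid hcheck ih =>
      intro _ hall
      have hb := PySem.Int.floordiv_two_mid_bounds h
      rw [solLoop, dif_pos h, if_pos hcheck]
      by_cases hlm : left ≤ mid - 1
      · exact ih hlm (fun x hx1 hx2 => hall x hx1 (by omega))
      · rw [solLoop, dif_neg (by omega)]
        omega
  | case2 left right result h mid hcheck ih =>
      intro _ hall
      have hb := PySem.Int.floordiv_two_mid_bounds h
      exact absurd (hall mid hb.1 hb.2) hcheck
  | case3 left right result h =>
      intro hlr _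
      omega

-- ===== VERDICT (by name: the statement is the Claim_ definition above) =====
theorem solution_spec : Claim_equal_solution := by
  unfold Claim_equal_solution
  intro n times _hdom hpre
  obtain ⟨hne, hcase⟩ := hpre
  unfold Spec_solution solution solution_alt
  set ts := PySem.List.sorted times (fun t => t) false with hts
  have hperm : ts.Perm times := PySem.List.sorted_perm times (fun t => t) false
  have hne' : ts ≠ [] := by
    intro h
    rw [h] at hperm
    exact hne hperm.nil_eq.symm
  have hlen : 1 ≤ ts.length := by
    cases hc : ts with
    | nil => exact absurd hc hne'
    | cons a l => simp
  have hlast : PySem.List.pyGetD ts (-1) 0 = ts[ts.length - 1]'(by omega) := by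
    rw [PySem.List.pyGetD_neg_ofNat ts 1 0 (by omega) (by omega)]
  have hmmem : ts[ts.length - 1]'(by omega) ∈ ts := List.getElem_mem _
  set m : Int := ts[ts.length - 1]'(by omega) with hm
  show solLoop n ts 0 (PySem.List.pyGetD ts (-1) 0 * n) 0 =
      if n ≤ 0 then 0
      else
        altPop ts
          (n - altLoad ts (PySem.Int.floordiv (n * 4611686018427387904) (altS ts))).toNat
          (altNxt ts (PySem.Int.floordiv (n * 4611686018427387904) (altS ts)))
          (PySem.Int.floordiv (n * 4611686018427387904) (altS ts))
  rw [hlast]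
  rcases hcase with hpos | ⟨hn0, hmin⟩
  · -- natural domain: every inspection time positive
    have hpos' : ∀ t ∈ ts, 0 < t := fun t htm => hpos t (hperm.mem_iff.1 htm)
    have hmpos : 0 < m := hpos' _ hmmem
    have hex : ∃ k : ℕ, n ≤ altLoad ts (k : Int) := by
      by_cases hn : n ≤ 0
      · exact ⟨0, by rw [Nat.cast_zero, altLoad_zero ts hpos']; omega⟩
      · refine ⟨(m * n).toNat, ?_⟩
        rw [Int.toNat_of_nonneg (mul_nonneg (le_of_lt hmpos) (by omega))]
        exact altLoad_hi ts hpos' hmmem (by omega)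
    set Tstar : Int := ((Nat.find hex : ℕ) : Int) with hTdef
    have hT0 : 0 ≤ Tstar := by rw [hTdef]; exact Int.natCast_nonneg _
    have hch : ∀ T, 0 ≤ T → (n ≤ altLoad ts T ↔ Tstar ≤ T) := by
      intro T hT
      constructor
      · intro hP
        have hP' : n ≤ altLoad ts ((T.toNat : ℕ) : Int) := by
          rwa [Int.toNat_of_nonneg hT]
        have := Nat.find_min' hex hP'
        omega
      · intro hge
        exact le_trans (Nat.find_spec hex) (altLoad_mono ts hpos' hge)
    have hA : solLoop n ts 0 (m * n) 0 = Tstar := by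
      apply solLoop_eq n ts hne' hpos' Tstar hT0 hch 0 (m * n) 0 le_rfl hT0
      by_cases hn : n ≤ 0
      · right
        have h0 : n ≤ altLoad ts 0 := by rw [altLoad_zero ts hpos']; omega
        have := (hch 0 le_rfl).1 h0
        omega
      · left
        exact (hch (m * n) (mul_nonneg (le_of_lt hmpos) (by omega))).1
          (altLoad_hi ts hpos' hmmem (by omega))
    rw [hA]
    by_cases hn : n ≤ 0
    · have h0 : n ≤ altLoad ts 0 := by rw [altLoad_zero ts hpos']; omega
      have := (hch 0 le_rfl).1 h0
      rw [if_pos hn]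
      omega
    · rw [if_neg hn]
      set T0 : Int := PySem.Int.floordiv (n * 4611686018427387904) (altS ts) with hT0def
      have hS : 0 < altS ts := altS_pos ts hne' hpos'
      have hT00 : 0 ≤ T0 := by
        rw [hT0def, PySem.Int.floordiv_eq_ediv_of_pos hS]
        exact Int.ediv_nonneg (by nlinarith) (le_of_lt hS)
      have hfeasT : n ≤ altLoad ts Tstar := (hch Tstar hT0).2 le_rfl
      have hT0le : T0 ≤ Tstar := jump_le n ts hpos' hne' Tstar hT0 hfeasT
      set c : Int := altLoad ts T0 with hcdef
      by_cases hcn : n ≤ c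
      · have hTle : Tstar ≤ T0 := (hch T0 hT00).1 hcn
        have h0 : (n - c).toNat = 0 := by omega
        rw [h0]
        have : altPop ts 0 (altNxt ts T0) T0 = T0 := rfl
        omega
      · have hr1 : 1 ≤ (n - c).toNat := by omega
        have hcr : c + ((n - c).toNat : Int) = n := by omega
        have hinv0 : PopInv ts (altNxt ts T0)
            (ts.map (fun t => PySem.Int.floordiv T0 t)) T0 c := by
          refine ⟨by simp [altNxt], by simp, hT00, rfl, ?_⟩
          intro k hk
          have hkt : 0 < ts[k]'hk := hpos' _ (List.getElem_mem hk)
          have hgts : ts.getD k 0 = ts[k]'hk := List.getD_eq_getElem ts 0 hk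
          have hga : (ts.map (fun t => PySem.Int.floordiv T0 t)).getD k 0 =
              PySem.Int.floordiv T0 (ts[k]'hk) := by
            rw [List.getD_eq_getElem _ 0 (by simpa using hk), List.getElem_map]
          have hgn : (altNxt ts T0).getD k 0 =
              (PySem.Int.floordiv T0 (ts[k]'hk) + 1) * ts[k]'hk := by
            rw [List.getD_eq_getElem _ 0 (by simp [altNxt]; omega)]
            simp [altNxt]
          rw [hga, hgn, hgts, PySem.Int.floordiv_eq_ediv_of_pos hkt]
          refine ⟨Int.ediv_nonneg hT00 (by omega), rfl, Int.ediv_mul_le T0 (by omega),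
            le_of_lt (Int.lt_ediv_add_one_mul_self T0 hkt)⟩
        exact (altPop_eq n Tstar ts hne' hpos' hch (n - c).toNat _ _ T0 c hinv0 hr1 hcr).symm
  · -- n ≤ 0 with a nonzero smallest time: A breaks on the first examiner at every mid
    rw [if_pos hn0]
    obtain ⟨h1, rest, hcons⟩ : ∃ h1 rest, ts = h1 :: rest := by
      cases hc : ts with
      | nil => exact absurd hc hne'
      | cons a l => exact ⟨a, l, rfl⟩
    have hhead_le : ∀ y ∈ times, h1 ≤ y := by
      exact PySem.List.key_head_sorted_le (key := fun t => t) (xs := times)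
        (by rw [← hts, hcons])
    have hm_le : h1 ≤ m := hhead_le m (hperm.mem_iff.1 hmmem)
    have hq : h1 < 0 ∨ 0 < h1 := by
      rcases hmin with h0nin | ⟨t, htmem, htneg⟩
      · have hh1mem : h1 ∈ times := hperm.mem_iff.1 (by rw [hcons]; simp)
        have : h1 ≠ 0 := fun h => h0nin (h ▸ hh1mem)
        omega
      · have := hhead_le t htmem
        left; omega
    have hall : ∀ mid, (0:Int) ≤ mid → mid ≤ m * n → solCheck n mid ts 0 = true := by
      intro mid hmid0 hmidr
      rw [hcons, solCheck_cons, if_pos]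
      rcases hq with hneg | hpos1
      · have h1m : n * m ≤ n * h1 := mul_le_mul_of_nonpos_left hm_le hn0
        have hcm : m * n = n * m := mul_comm m n
        have := n_le_floordiv mid h1 n hneg (by omega)
        omega
      · have hdnn : 0 ≤ PySem.Int.floordiv mid h1 := by
          rw [PySem.Int.floordiv_eq_ediv_of_pos hpos1]
          exact Int.ediv_nonneg hmid0 (by omega)
        omega
    by_cases hr : (0:Int) ≤ m * n
    · exact solLoop_all n ts 0 (m * n) 0 hr (fun mid hx1 hx2 => hall mid hx1 hx2)
    · rw [solLoop, dif_neg (by omega)]
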